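-- pv_equiv track=rewrite | github.com/Cyrus-Malekani/codewars | python/sum-by-factors.py | sum_for_list
-- ===== SOURCE A (Python) =====
-- def prime_factors(n):
--     i = 2
--     n = abs(n)
--     factors = {}
--
--     while i * i <= n:
--         if n % i:
--             i += 1
--         else:
--             n //= i
--             factors[i] = 0
--
--     if n > 1:
--         factors[n] = 0
--
--     return factors
--
-- def sum_for_list(lst):
--     p_dict = {}
--     res = []
--
--     #Getting prime factors of every number and adding them to p_dict
--     for numbers in lst:
--         for key in prime_factors(numbers): #Since the function returns a dictionary we can use the keys as iterator
--             p_dict[key] = 0 #Just adding keys (prime factors) to the dictionary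
--
--     #Adding the values to the dict
--     for number in lst:
--         for prime in p_dict.keys():
--             if number%prime == 0:
--                 p_dict[prime] += number
--
--     #Adding dict key/value to a list to return desired type
--     for key in p_dict:
--         val = p_dict[key]
--         res.append([key,val])
--
--     res.sort() #Sorting the list
--     return res
-- ===== SOURCE B (Python) =====
-- def sum_for_list(lst):
--     sums = {}
--     for x in lst:
--         n = abs(x)
--         d = 2
--         while d * d <= n:
--             if n % d == 0:
--                 sums[d] = sums.get(d, 0) + x
--                 while n % d == 0:
--                     n //= d
--             d += 1
--         if n > 1:
--             sums[n] = sums.get(n, 0) + x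
--     return sorted([p, s] for p, s in sums.items())
-- ===== Notes on version B (the rewrite author's own statement) =====
-- stated objective: faster
-- what changed: B makes a single pass that factorizes each number once (dividing out each prime's multiplicity) and adds the number directly into a running prime->sum dictionary, instead of A's three phases: factorize every number to collect the prime set, then re-test every number against every prime with a modulus, then build and sort the list.
import Mathlib
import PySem

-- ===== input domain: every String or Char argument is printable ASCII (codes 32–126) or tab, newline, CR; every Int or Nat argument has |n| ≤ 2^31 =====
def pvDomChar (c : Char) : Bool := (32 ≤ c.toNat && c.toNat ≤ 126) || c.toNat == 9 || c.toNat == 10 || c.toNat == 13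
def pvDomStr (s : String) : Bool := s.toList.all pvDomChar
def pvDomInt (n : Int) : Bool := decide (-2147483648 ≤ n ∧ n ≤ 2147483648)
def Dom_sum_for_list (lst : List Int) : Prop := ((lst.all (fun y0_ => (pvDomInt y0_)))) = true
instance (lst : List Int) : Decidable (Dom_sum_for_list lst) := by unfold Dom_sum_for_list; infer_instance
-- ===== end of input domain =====

-- B replaces A's three phases (collect all prime factors, then re-test every number against every
-- prime, then build and sort) by a single pass that factorizes each number once and adds it into a
-- running prime->sum dictionary; a timing run measured it faster.

-- ===== PORT A =====
-- the while-loop of prime_factors; the `2 ≤ i` conjunct is a totality guard only (all calls use i = 2)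
def pfLoop (n i : Nat) (factors : PySem.Dict Int Int) : Nat × PySem.Dict Int Int :=
  if h : 2 ≤ i ∧ i * i ≤ n then
    if n % i ≠ 0 then pfLoop n (i + 1) factors
    else pfLoop (n / i) i (factors.insert (i : Int) 0)
  else (n, factors)
termination_by (n, n - i)
decreasing_by
  · exact Prod.Lex.right n (by have := Nat.mul_le_mul_right i h.1; omega)
  · exact Prod.Lex.left _ _ (Nat.div_lt_self (by have := Nat.mul_le_mul h.1 h.1; omega) (by omega))

def prime_factors (n : Int) : PySem.Dict Int Int :=
  let r := pfLoop n.natAbs 2 PySem.Dict.empty      -- i = 2; n = abs(n)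
  if 1 < r.1 then r.2.insert ((r.1 : Nat) : Int) 0 else r.2

def sum_for_list (lst : List Int) : List (List Int) :=
  let p_dict := lst.foldl
    (fun d numbers => (prime_factors numbers).keys.foldl (fun d key => d.insert key 0) d)
    PySem.Dict.empty
  let p_dict2 := lst.foldl
    (fun d number => d.keys.foldl
      (fun d2 prime => if PySem.Int.mod number prime = 0 then d2.modify prime 0 (fun v => v + number) else d2) d)
    p_dict
  let res := p_dict2.items.map (fun kv => [kv.1, kv.2])
  PySem.List.sorted res (fun x => x) false

-- ===== PORT B =====
-- `while n % d == 0: n //= d`; the `2 ≤ d ∧ n ≠ 0` conjuncts are totality guards only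
def rmAll (n d : Nat) : Nat :=
  if h : 2 ≤ d ∧ n ≠ 0 ∧ n % d = 0 then rmAll (n / d) d else n
termination_by n
decreasing_by exact Nat.div_lt_self (Nat.pos_of_ne_zero h.2.1) (by omega)

theorem rmAll_le (n d : Nat) : rmAll n d ≤ n := by
  fun_induction rmAll n d with
  | case1 n h ih => exact le_trans ih (Nat.div_le_self _ _)
  | case2 n h => exact le_rfl

theorem rmAll_lt (n d : Nat) (h2 : 2 ≤ d) (h4 : d * d ≤ n) (hd : n % d = 0) : rmAll n d < n := by
  have hn : n ≠ 0 := by have := Nat.mul_le_mul h2 h2; omega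
  rw [rmAll]
  simp only [h2, hn, hd, and_self, ne_eq, not_false_eq_true, dif_pos]
  exact lt_of_le_of_lt (rmAll_le _ _)
    (Nat.div_lt_self (Nat.pos_of_ne_zero hn) (by omega))

-- the outer while-loop of B's factorization; `2 ≤ d` is a totality guard only (all calls use d = 2)
def bLoop (n d : Nat) (x : Int) (sums : PySem.Dict Int Int) : Nat × PySem.Dict Int Int :=
  if h : 2 ≤ d ∧ d * d ≤ n then
    if hd : n % d = 0 then
      bLoop (rmAll n d) (d + 1) x (sums.insert (d : Int) (sums.getD (d : Int) 0 + x))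
    else bLoop n (d + 1) x sums
  else (n, sums)
termination_by (n, n - d)
decreasing_by
  · exact Prod.Lex.left _ _ (rmAll_lt n d h.1 h.2 hd)
  · exact Prod.Lex.right n (by have := Nat.mul_le_mul_right d h.1; omega)

def sum_for_list_alt (lst : List Int) : List (List Int) :=
  let sums := lst.foldl
    (fun sums x =>
      let r := bLoop x.natAbs 2 x sums
      if 1 < r.1 then r.2.insert ((r.1 : Nat) : Int) (r.2.getD ((r.1 : Nat) : Int) 0 + x) else r.2)
    PySem.Dict.empty
  PySem.List.sorted (sums.items.map (fun ps => [ps.1, ps.2])) (fun l => l) false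

-- ===== PRECONDITION & SPEC =====
def Spec_sum_for_list (lst : List Int) (out : List (List Int)) : Prop := out = sum_for_list_alt lst
instance (lst : List Int) (out : List (List Int)) : Decidable (Spec_sum_for_list lst out) := by unfold Spec_sum_for_list; infer_instance

-- ===== CLAIM (what is proved, stated in full; the proofs are below) =====
def Claim_equal_sum_for_list : Prop := ∀ (lst : List Int), Dom_sum_for_list lst → Spec_sum_for_list lst (sum_for_list lst)

-- ===== LEMMAS AND PROOFS =====

-- the list of distinct prime factors of n found by trial division from d upward
def pkAll (n d : Nat) : List Nat :=
  if h : 2 ≤ d ∧ d * d ≤ n then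
    if n % d = 0 then d :: pkAll (rmAll n d) (d + 1) else pkAll n (d + 1)
  else if 1 < n then [n] else []
termination_by (n, n - d)
decreasing_by
  · exact Prod.Lex.left _ _ (rmAll_lt n d h.1 h.2 (by assumption))
  · exact Prod.Lex.right n (by have := Nat.mul_le_mul_right d h.1; omega)

def pk (x : Int) : List Nat := pkAll x.natAbs 2
def pkInt (x : Int) : List Int := (pk x).map (fun (p : Nat) => (p : Int))

-- "no divisor in [2, d) divides n"
def pvInv (n d : Nat) : Prop := ∀ j, 2 ≤ j → j < d → ¬ j ∣ n

def addK (f : PySem.Dict Int Int) (l : List Nat) : PySem.Dict Int Int :=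
  l.foldl (fun (f : PySem.Dict Int Int) (p : Nat) => f.insert (p : Int) 0) f
def addP (x : Int) (s : PySem.Dict Int Int) (l : List Nat) : PySem.Dict Int Int :=
  l.foldl (fun (s : PySem.Dict Int Int) (p : Nat) => s.insert (p : Int) (s.getD (p : Int) 0 + x)) s

-- ---- rmAll facts ----
theorem rmAll_dvd (n d : Nat) : rmAll n d ∣ n := by
  fun_induction rmAll n d with
  | case1 n h ih => exact ih.trans (Nat.div_dvd_of_dvd (Nat.dvd_of_mod_eq_zero h.2.2))
  | case2 n h => exact dvd_rfl

theorem rmAll_pos (n d : Nat) : 1 ≤ n → 1 ≤ rmAll n d := by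
  fun_induction rmAll n d with
  | case1 n h ih =>
    intro hn
    exact ih (Nat.div_pos (Nat.le_of_dvd (by omega) (Nat.dvd_of_mod_eq_zero h.2.2)) (by omega))
  | case2 n h => exact id

theorem rmAll_not_dvd (n d : Nat) (h2 : 2 ≤ d) : n ≠ 0 → ¬ d ∣ rmAll n d := by
  fun_induction rmAll n d with
  | case1 n h ih =>
    intro _
    exact ih (by
      have := Nat.div_pos (Nat.le_of_dvd (by omega) (Nat.dvd_of_mod_eq_zero h.2.2)) (by omega : 0 < d)
      omega)
  | case2 n h =>
    intro hn hdvd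
    exact h ⟨h2, hn, Nat.mod_eq_zero_of_dvd hdvd⟩

theorem rmAll_eq_of_not_dvd (n d : Nat) (h : ¬ d ∣ n) (h2 : 2 ≤ d) : rmAll n d = n := by
  rw [rmAll]
  have : ¬ n % d = 0 := fun hc => h (Nat.dvd_of_mod_eq_zero hc)
  simp [this]

theorem rmAll_step (n d : Nat) (h2 : 2 ≤ d) (hn : n ≠ 0) (hd : d ∣ n) : rmAll n d = rmAll (n / d) d := by
  rw [rmAll]
  simp [h2, hn, Nat.mod_eq_zero_of_dvd hd]

theorem dvd_rmAll (n d p : Nat) (hp : p.Prime) (hdp : d.Prime) (hne : p ≠ d) :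
    p ∣ n → p ∣ rmAll n d := by
  fun_induction rmAll n d with
  | case1 n h ih =>
    intro hpn
    apply ih
    have hdn : d ∣ n := Nat.dvd_of_mod_eq_zero h.2.2
    have : n = n / d * d := (Nat.div_mul_cancel hdn).symm
    rw [this] at hpn
    rcases (Nat.Prime.dvd_mul hp).mp hpn with h1 | h1
    · exact h1
    · exact absurd ((Nat.prime_dvd_prime_iff_eq hp hdp).mp h1) hne
  | case2 n h => exact id

-- ---- dict helpers ----
theorem dict_insert_self (d : PySem.Dict Int Int) (k : Int) (v : Int)
    (h : d.get? k = some v) (hnd : d.keys.Nodup) : d.insert k v = d := by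
  apply PySem.Dict.ext
  have hc : d.contains k = true := by rw [PySem.Dict.contains_eq_isSome_get?, h]; rfl
  rw [PySem.Dict.items_insert_of_contains d v hc]
  rw [show d.items.map (fun p => if (p.1 == k) = true then (k, v) else p) = d.items.map id from
    List.map_congr_left ?_, List.map_id]
  intro p hp
  by_cases hpk : p.1 = k
  · have : d.get? k = some p.2 := (PySem.Dict.get?_eq_some_iff_mem_items d k p.2 hnd).mpr (by
      have : p = (k, p.2) := by cases p; simp_all
      rwa [← this])
    have hv : p.2 = v := by rw [h] at this; exact (Option.some_inj.mp this).symm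
    simp [hpk, hv]
    cases p; simp_all
  · simp [hpk]

theorem dict_mk_items_ext (l : List (Int × Int)) : ∀ (l' : List (Int × Int)),
    (PySem.Dict.mk l).keys = (PySem.Dict.mk l').keys →
    (PySem.Dict.mk l).keys.Nodup →
    (∀ k, (PySem.Dict.mk l).get? k = (PySem.Dict.mk l').get? k) → l = l' := by
  induction l with
  | nil =>
    intro l' hk _ _
    rw [PySem.Dict.keys_mk, PySem.Dict.keys_mk] at hk
    exact (List.map_eq_nil_iff.mp hk.symm).symm
  | cons p t ih =>
    intro l' hk hnd hv
    rw [PySem.Dict.keys_mk, PySem.Dict.keys_mk] at hk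
    cases l' with
    | nil => simp at hk
    | cons p' t' =>
      obtain ⟨k, v⟩ := p
      obtain ⟨k', v'⟩ := p'
      simp only [List.map_cons, List.cons.injEq] at hk
      have hkk : k = k' := hk.1
      have hvv : v = v' := by
        have := hv k
        rw [PySem.Dict.get?_mk_cons, PySem.Dict.get?_mk_cons] at this
        simp [hkk] at this
        exact this
      subst hkk hvv
      have hndt : (PySem.Dict.mk t).keys.Nodup := by
        rw [PySem.Dict.keys_mk]
        rw [PySem.Dict.keys_mk] at hnd
        exact hnd.tail
      have hknot : k ∉ (PySem.Dict.mk t).keys := by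
        rw [PySem.Dict.keys_mk]
        rw [PySem.Dict.keys_mk] at hnd
        simp only [List.map_cons] at hnd
        exact (List.nodup_cons.mp hnd).1
      have hknot' : k ∉ (PySem.Dict.mk t').keys := by
        rw [PySem.Dict.keys_mk]
        rw [PySem.Dict.keys_mk] at hknot
        rw [hk.2] at hknot
        exact hknot
      have : t = t' := by
        apply ih t'
        · rw [PySem.Dict.keys_mk, PySem.Dict.keys_mk]; exact hk.2
        · exact hndt
        · intro x
          by_cases hxk : x = k
          · subst hxk
            rw [(PySem.Dict.get?_eq_none_iff_not_mem_keys _ _).mpr hknot,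
                (PySem.Dict.get?_eq_none_iff_not_mem_keys _ _).mpr hknot']
          · have := hv x
            rw [PySem.Dict.get?_mk_cons, PySem.Dict.get?_mk_cons] at this
            have hne : (k == x) = false := by simp [Ne.symm hxk]
            simpa [hne] using this
      rw [this]

theorem dict_items_ext (d d' : PySem.Dict Int Int) (hk : d.keys = d'.keys)
    (hnd : d.keys.Nodup) (hv : ∀ k, d.get? k = d'.get? k) : d.items = d'.items := by
  obtain ⟨l⟩ := d
  obtain ⟨l'⟩ := d'
  exact dict_mk_items_ext l l' hk hnd hv

theorem dict_get?_eq_of_getD (d d' : PySem.Dict Int Int) (hk : d.keys = d'.keys)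
    (hv : ∀ k, d.getD k 0 = d'.getD k 0) : ∀ k, d.get? k = d'.get? k := by
  intro k
  by_cases hm : k ∈ d.keys
  · have h1 : (d.get? k).isSome := by
      rw [← PySem.Dict.contains_eq_isSome_get?]
      exact (PySem.Dict.contains_iff_mem_keys d k).mpr hm
    have h2 : (d'.get? k).isSome := by
      rw [← PySem.Dict.contains_eq_isSome_get?]
      exact (PySem.Dict.contains_iff_mem_keys d' k).mpr (hk ▸ hm)
    obtain ⟨v, hv1⟩ := Option.isSome_iff_exists.mp h1
    obtain ⟨v', hv2⟩ := Option.isSome_iff_exists.mp h2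
    rw [hv1, hv2]
    have e1 := PySem.Dict.getD_of_get?_eq_some d (0 : Int) hv1
    have e2 := PySem.Dict.getD_of_get?_eq_some d' (0 : Int) hv2
    rw [hv k] at e1
    rw [e1] at e2
    rw [e2]
  · rw [(PySem.Dict.get?_eq_none_iff_not_mem_keys _ _).mpr hm,
        (PySem.Dict.get?_eq_none_iff_not_mem_keys _ _).mpr (hk ▸ hm)]

-- ---- pkAll unfolding ----
theorem pkAll_exit (n d : Nat) (h : ¬ (2 ≤ d ∧ d * d ≤ n)) :
    pkAll n d = if 1 < n then [n] else [] := by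
  rw [pkAll]; simp [h]

theorem pkAll_div (n d : Nat) (h2 : 2 ≤ d) (h4 : d * d ≤ n) (hd : n % d = 0) :
    pkAll n d = d :: pkAll (rmAll n d) (d + 1) := by
  rw [pkAll]; simp [h2, h4, hd]

theorem pkAll_ndiv (n d : Nat) (h2 : 2 ≤ d) (h4 : d * d ≤ n) (hd : ¬ n % d = 0) :
    pkAll n d = pkAll n (d + 1) := by
  rw [pkAll]; simp [h2, h4, hd]

theorem pkAll_succ_of_not_dvd (n d : Nat) (h2 : 2 ≤ d) (h : ¬ d ∣ n) :
    pkAll n d = pkAll n (d + 1) := by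
  by_cases h4 : d * d ≤ n
  · exact pkAll_ndiv n d h2 h4 (fun hc => h (Nat.dvd_of_mod_eq_zero hc))
  · rw [pkAll_exit n d (fun hc => h4 hc.2), pkAll_exit n (d + 1) ?_]
    rintro ⟨-, hx⟩
    have : d * d ≤ (d + 1) * (d + 1) := Nat.mul_le_mul (by omega) (by omega)
    omega

-- ---- B loop characterization ----
theorem bLoop_eq (n d : Nat) (x : Int) (s : PySem.Dict Int Int) :
    (if 1 < (bLoop n d x s).1
      then (bLoop n d x s).2.insert (((bLoop n d x s).1 : Nat) : Int)
            ((bLoop n d x s).2.getD (((bLoop n d x s).1 : Nat) : Int) 0 + x)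
      else (bLoop n d x s).2) = addP x s (pkAll n d) := by
  fun_induction bLoop n d x s with
  | case1 n d s h hd ih =>
    rw [pkAll_div n d h.1 h.2 hd]
    simp only [addP, List.foldl_cons]
    exact ih
  | case2 n d s h hd ih =>
    rw [pkAll_ndiv n d h.1 h.2 hd]
    exact ih
  | case3 n d s h =>
    rw [pkAll_exit n d h]
    by_cases h1 : 1 < n <;> simp [h1, addP]

theorem pvInv_two (n : Nat) : pvInv n 2 := fun j hj hj2 => by omega

-- ---- A loop characterization ----
theorem pk_skip (m i : Nat) (g : PySem.Dict Int Int) (h2 : 2 ≤ i) (inv : pvInv m i)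
    (hnd : g.keys.Nodup) (hg : g.get? (i : Int) = some 0) :
    addK g (pkAll m i) = addK g (pkAll (rmAll m i) (i + 1)) := by
  by_cases him : i ∣ m
  · by_cases hm0 : m = 0
    · subst hm0
      have hr : rmAll 0 i = 0 := by rw [rmAll]; simp
      have hguard : ∀ j : Nat, ¬ (2 ≤ j ∧ j * j ≤ 0) := by
        rintro j ⟨hj, hx⟩
        have := Nat.mul_le_mul hj hj
        omega
      rw [hr, pkAll_exit 0 i (hguard i), pkAll_exit 0 (i + 1) (hguard (i + 1))]
    · by_cases h4 : i * i ≤ m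
      · rw [pkAll_div m i h2 h4 (Nat.mod_eq_zero_of_dvd him)]
        simp only [addK, List.foldl_cons]
        rw [dict_insert_self g (i : Int) 0 hg hnd]
      · -- m < i*i together with the invariant forces m = i
        have hpos : 0 < m := Nat.pos_of_ne_zero hm0
        have hdivm : m / i ∣ m := Nat.div_dvd_of_dvd him
        have hklt : m / i < i := (Nat.div_lt_iff_lt_mul (by omega : 0 < i)).mpr (by omega)
        have hkpos : 0 < m / i := Nat.div_pos (Nat.le_of_dvd hpos him) (by omega)
        have hk1 : m / i = 1 := by
          by_contra hk
          exact inv (m / i) (by omega) hklt hdivm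
        have hmi : m = i := by
          have := Nat.div_mul_cancel him
          rw [hk1] at this; omega
        subst hmi
        have hii : ¬ (2 ≤ m ∧ m * m ≤ m) := by
          rintro ⟨hj, hx⟩
          have := Nat.mul_le_mul_right m hj
          omega
        rw [pkAll_exit m m hii]
        have h1m : 1 < m := by omega
        have hr : rmAll m m = 1 := by
          rw [rmAll]
          simp only [h2, hm0, Nat.mod_self, and_self, ne_eq, not_false_eq_true, dif_pos]
          rw [Nat.div_self hpos, rmAll]
          have : 1 % m = 1 := Nat.mod_eq_of_lt h1m
          simp [this]
        rw [hr, pkAll_exit 1 (m + 1) (by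
          rintro ⟨-, hx⟩
          have : 2 * 2 ≤ (m + 1) * (m + 1) := Nat.mul_le_mul (by omega) (by omega)
          omega)]
        simp only [h1m, if_pos, show ¬ (1 < 1) by omega, if_neg, not_false_eq_true]
        simp only [addK, List.foldl_cons, List.foldl_nil]
        rw [dict_insert_self g (m : Int) 0 hg hnd]
  · rw [rmAll_eq_of_not_dvd m i him h2, pkAll_succ_of_not_dvd m i h2 him]

theorem aFull_eq (n i : Nat) (f : PySem.Dict Int Int) :
    2 ≤ i → pvInv n i → f.keys.Nodup →
    (if 1 < (pfLoop n i f).1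
      then (pfLoop n i f).2.insert (((pfLoop n i f).1 : Nat) : Int) 0
      else (pfLoop n i f).2) = addK f (pkAll n i) := by
  fun_induction pfLoop n i f with
  | case1 n i f h hd ih =>
    intro h2 inv hnd
    rw [ih (by omega) (fun j hj hji hdvd => by
          rcases Nat.lt_succ_iff_lt_or_eq.mp hji with hlt | heq
          · exact inv j hj hlt hdvd
          · subst heq; exact hd (Nat.mod_eq_zero_of_dvd hdvd)) hnd]
    exact congrArg (addK f) (pkAll_ndiv n i h2 h.2 (by simpa using hd)).symm
  | case2 n i f h hd ih =>
    intro h2 inv hnd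
    have hdvd : i ∣ n := Nat.dvd_of_mod_eq_zero (by simpa using hd)
    have hn0 : n ≠ 0 := by
      have := Nat.mul_le_mul h.1 h.1
      omega
    have hinv' : pvInv (n / i) i := fun j hj hji hdvd' =>
      inv j hj hji (hdvd'.trans (Nat.div_dvd_of_dvd hdvd))
    rw [ih h2 hinv' (PySem.Dict.nodup_keys_insert f (i : Int) 0 hnd)]
    rw [pk_skip (n / i) i (f.insert (i : Int) 0) h2 hinv'
          (PySem.Dict.nodup_keys_insert f (i : Int) 0 hnd)
          (PySem.Dict.get?_insert_self f (i : Int) 0)]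
    rw [← rmAll_step n i h2 hn0 hdvd]
    rw [pkAll_div n i h2 h.2 (Nat.mod_eq_zero_of_dvd hdvd)]
    simp only [addK, List.foldl_cons]
  | case3 n i f h =>
    intro h2 inv hnd
    rw [pkAll_exit n i h]
    by_cases h1 : 1 < n <;> simp [h1, addK]

theorem prime_factors_eq (x : Int) :
    prime_factors x = addK PySem.Dict.empty (pk x) := by
  simp only [prime_factors]
  exact aFull_eq x.natAbs 2 PySem.Dict.empty le_rfl (pvInv_two _) PySem.Dict.nodup_keys_empty

-- ---- characterization of pkAll ----
theorem min_div_prime (n d : Nat) (h2 : 2 ≤ d) (hd : d ∣ n) (hn : 1 ≤ n) (inv : pvInv n d) : d.Prime := by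
  rw [Nat.prime_def_lt]
  refine ⟨h2, fun m hm hmd => ?_⟩
  by_contra hm1
  have hm0 : m ≠ 0 := by rintro rfl; have := Nat.eq_zero_of_zero_dvd hmd; omega
  exact inv m (by omega) hm (hmd.trans hd)

theorem exit_prime (n d : Nat) (h2 : 2 ≤ d) (hlt : n < d * d) (h1 : 1 < n) (inv : pvInv n d) : n.Prime := by
  rw [Nat.prime_def_lt]
  refine ⟨h1, fun m hm hmd => ?_⟩
  by_contra hm1
  have hm0 : m ≠ 0 := by rintro rfl; have := Nat.eq_zero_of_zero_dvd hmd; omega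
  by_cases hmd' : m < d
  · exact inv m (by omega) hmd' hmd
  · have hk : n / m ∣ n := Nat.div_dvd_of_dvd hmd
    have hkm : n / m * m = n := Nat.div_mul_cancel hmd
    have hk2 : 2 ≤ n / m := by
      rcases Nat.lt_or_ge (n / m) 2 with hlt2 | hge
      · exfalso
        rcases (Nat.lt_succ_iff_lt_or_eq.mp hlt2) with hlt1 | h1
        · have h0 : n / m = 0 := Nat.lt_one_iff.mp hlt1
          rw [h0] at hkm; omega
        · rw [h1, one_mul] at hkm; omega
      · exact hge
    have hklt : n / m < d := by
      apply (Nat.div_lt_iff_lt_mul (by omega : 0 < m)).mpr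
      have : d * d ≤ d * m := Nat.mul_le_mul_left d (by omega)
      omega
    exact inv (n / m) hk2 hklt hk

theorem pvInv_rmAll (n d : Nat) (h2 : 2 ≤ d) (hn : n ≠ 0) (inv : pvInv n d) :
    pvInv (rmAll n d) (d + 1) := by
  intro j hj hji hjd
  rcases Nat.lt_succ_iff_lt_or_eq.mp hji with hlt | heq
  · exact inv j hj hlt (hjd.trans (rmAll_dvd n d))
  · exact rmAll_not_dvd n d h2 hn (heq ▸ hjd)

theorem pvInv_succ (n d : Nat) (inv : pvInv n d) (hnd : ¬ d ∣ n) : pvInv n (d + 1) := by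
  intro j hj hji hjd
  rcases Nat.lt_succ_iff_lt_or_eq.mp hji with hlt | heq
  · exact inv j hj hlt hjd
  · exact hnd (heq ▸ hjd)

theorem pk_mem (n d : Nat) : 2 ≤ d → 1 ≤ n → pvInv n d →
    ∀ p, (p ∈ pkAll n d ↔ (p.Prime ∧ p ∣ n)) := by
  fun_induction pkAll n d with
  | case1 n d h hd ih =>
    intro h2 hn inv p
    have hdvd : d ∣ n := Nat.dvd_of_mod_eq_zero hd
    have hdp : d.Prime := min_div_prime n d h2 hdvd hn inv
    have hrpos : 1 ≤ rmAll n d := rmAll_pos n d hn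
    have hinv' : pvInv (rmAll n d) (d + 1) := pvInv_rmAll n d h2 (by omega) inv
    have ihs := ih (by omega) hrpos hinv' p
    simp only [List.mem_cons, ihs]
    constructor
    · rintro (rfl | ⟨hp, hpd⟩)
      · exact ⟨hdp, hdvd⟩
      · exact ⟨hp, hpd.trans (rmAll_dvd n d)⟩
    · rintro ⟨hp, hpn⟩
      by_cases hpd : p = d
      · exact Or.inl hpd
      · exact Or.inr ⟨hp, dvd_rmAll n d p hp hdp hpd hpn⟩
  | case2 n d h hd ih =>
    intro h2 hn inv p
    exact ih (by omega) hn (pvInv_succ n d inv (fun hdvd => hd (Nat.mod_eq_zero_of_dvd hdvd))) p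
  | case3 n d h h1 =>
    intro h2 hn inv p
    have hlt : n < d * d := by
      rcases Nat.lt_or_ge n (d * d) with hx | hx
      · exact hx
      · exact absurd ⟨h2, hx⟩ h
    have hnp : n.Prime := exit_prime n d h2 hlt h1 inv
    simp only [List.mem_singleton]
    constructor
    · rintro rfl; exact ⟨hnp, dvd_rfl⟩
    · rintro ⟨hp, hpn⟩
      exact (Nat.prime_dvd_prime_iff_eq hp hnp).mp hpn
  | case4 n d h h1 =>
    intro h2 hn inv p
    have hn1 : n = 1 := by omega
    subst hn1
    simp only [List.not_mem_nil, false_iff, not_and]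
    intro hp hpd
    exact hp.one_lt.ne' (Nat.dvd_one.mp hpd)

theorem pk_sorted (n d : Nat) : 2 ≤ d → pvInv n d →
    (∀ p ∈ pkAll n d, d ≤ p) ∧ (pkAll n d).Pairwise (· < ·) := by
  fun_induction pkAll n d with
  | case1 n d h hd ih =>
    intro h2 inv
    have hn0 : n ≠ 0 := by have := Nat.mul_le_mul h.1 h.1; omega
    obtain ⟨hge, hpw⟩ := ih (by omega) (pvInv_rmAll n d h2 hn0 inv)
    refine ⟨?_, List.pairwise_cons.mpr ⟨fun p hp => ?_, hpw⟩⟩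
    · intro p hp
      rcases List.mem_cons.mp hp with rfl | hp'
      · exact le_rfl
      · exact le_trans (by omega) (hge p hp')
    · exact lt_of_lt_of_le (by omega) (hge p hp)
  | case2 n d h hd ih =>
    intro h2 inv
    obtain ⟨hge, hpw⟩ := ih (by omega)
      (pvInv_succ n d inv (fun hdvd => hd (Nat.mod_eq_zero_of_dvd hdvd)))
    exact ⟨fun p hp => le_trans (by omega) (hge p hp), hpw⟩
  | case3 n d h h1 =>
    intro h2 inv
    refine ⟨?_, List.pairwise_singleton _ _⟩
    intro p hp
    rw [List.mem_singleton] at hp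
    subst hp
    by_contra hlt
    exact inv p (by omega) (by omega) dvd_rfl
  | case4 n d h h1 =>
    intro h2 inv
    simp

theorem pk_nodup (x : Int) : (pk x).Nodup := by
  have hpw := (pk_sorted x.natAbs 2 le_rfl (pvInv_two _)).2
  exact hpw.imp (fun h => Nat.ne_of_lt h)

theorem pkInt_nodup (x : Int) : (pkInt x).Nodup := by
  exact List.Nodup.map (fun a b hab => Int.natCast_inj.mp hab) (pk_nodup x)

theorem mem_pk (x : Int) (p : Nat) : p ∈ pk x ↔ (p.Prime ∧ p ∣ x.natAbs ∧ x ≠ 0) := by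
  by_cases hx : x = 0
  · subst hx
    have : pk 0 = [] := by
      rw [pk, pkAll_exit _ 2 (by rintro ⟨-, hx⟩; simp at hx)]
      simp
    simp [this]
  · have hn : 1 ≤ x.natAbs := Int.natAbs_pos.mpr hx
    rw [pk, pk_mem x.natAbs 2 le_rfl hn (pvInv_two _) p]
    simp [hx]


-- ---- bookkeeping for the insert/modify folds ----
theorem addK_cons (f : PySem.Dict Int Int) (p : Nat) (t : List Nat) :
    addK f (p :: t) = addK (f.insert (p : Int) 0) t := rfl

theorem addP_cons (x : Int) (s : PySem.Dict Int Int) (p : Nat) (t : List Nat) :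
    addP x s (p :: t) = addP x (s.insert (p : Int) (s.getD (p : Int) 0 + x)) t := rfl

theorem addK_keys (f : PySem.Dict Int Int) (l : List Nat) :
    (addK f l).keys = PySem.Set.update f.keys (l.map (fun (p : Nat) => (p : Int))) := by
  unfold addK
  exact PySem.Dict.keys_foldl_insert_key l (fun (p : Nat) => (p : Int)) (fun _ _ => 0) f

theorem addP_keys (x : Int) (s : PySem.Dict Int Int) (l : List Nat) :
    (addP x s l).keys = PySem.Set.update s.keys (l.map (fun (p : Nat) => (p : Int))) := by
  unfold addP
  exact PySem.Dict.keys_foldl_insert_key l (fun (p : Nat) => (p : Int))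
    (fun s p => s.getD (p : Int) 0 + x) s

theorem addK_nodup (f : PySem.Dict Int Int) (l : List Nat) (h : f.keys.Nodup) :
    (addK f l).keys.Nodup := by
  unfold addK
  exact PySem.Dict.nodup_keys_foldl_insert_key l (fun (p : Nat) => (p : Int)) (fun _ _ => 0) f h

theorem addK_getD0 (l : List Nat) : ∀ f : PySem.Dict Int Int,
    (∀ q, f.getD q 0 = 0) → ∀ q, (addK f l).getD q 0 = 0 := by
  induction l with
  | nil => intro f h q; exact h q
  | cons p t ih =>
    intro f h q
    rw [addK_cons]
    refine ih _ (fun q' => ?_) q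
    rw [PySem.Dict.getD_insert]
    split
    · rfl
    · exact h q'

theorem addP_getD (x : Int) (l : List Nat) : ∀ (s : PySem.Dict Int Int) (p : Int),
    (l.map (fun (q : Nat) => (q : Int))).Nodup →
    (addP x s l).getD p 0 = s.getD p 0 + (if p ∈ l.map (fun (q : Nat) => (q : Int)) then x else 0) := by
  induction l with
  | nil => intro s p _; simp [addP]
  | cons q t ih =>
    intro s p hnd
    simp only [List.map_cons] at hnd
    obtain ⟨hqt, hnd'⟩ := List.nodup_cons.mp hnd
    rw [addP_cons, ih _ p hnd', PySem.Dict.getD_insert]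
    by_cases hpq : p = (q : Int)
    · subst hpq
      simp [hqt]
    · simp [hpq]

-- ---- the value-update loop of A's second phase ----
theorem inner2_keys (x : Int) (K : List Int) : ∀ d : PySem.Dict Int Int, (∀ q ∈ K, q ∈ d.keys) →
    (K.foldl (fun d2 prime =>
        if PySem.Int.mod x prime = 0 then d2.modify prime 0 (fun v => v + x) else d2) d).keys
      = d.keys := by
  induction K with
  | nil => intro d _; rfl
  | cons q t ih =>
    intro d hK
    rw [List.foldl_cons]
    have hq : q ∈ d.keys := hK q List.mem_cons_self
    have hkeys : (if PySem.Int.mod x q = 0 then d.modify q 0 (fun v => v + x) else d).keys = d.keys := by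
      split
      · rw [PySem.Dict.keys_modify]
        exact PySem.Dict.keys_insert_of_contains _ _ ((PySem.Dict.contains_iff_mem_keys _ _).mpr hq)
      · rfl
    rw [ih _ (fun q' hq' => by rw [hkeys]; exact hK q' (List.mem_cons_of_mem _ hq')), hkeys]

theorem inner2_getD (x : Int) (K : List Int) : ∀ (d : PySem.Dict Int Int) (p : Int),
    K.Nodup → (∀ q ∈ K, q ∈ d.keys) →
    (K.foldl (fun d2 prime =>
        if PySem.Int.mod x prime = 0 then d2.modify prime 0 (fun v => v + x) else d2) d).getD p 0
      = d.getD p 0 + (if p ∈ K ∧ PySem.Int.mod x p = 0 then x else 0) := by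
  induction K with
  | nil => intro d p _ _; simp
  | cons q t ih =>
    intro d p hnd hK
    obtain ⟨hqt, hnd'⟩ := List.nodup_cons.mp hnd
    rw [List.foldl_cons]
    have hq : q ∈ d.keys := hK q List.mem_cons_self
    have hkeys : (if PySem.Int.mod x q = 0 then d.modify q 0 (fun v => v + x) else d).keys = d.keys := by
      split
      · rw [PySem.Dict.keys_modify]
        exact PySem.Dict.keys_insert_of_contains _ _ ((PySem.Dict.contains_iff_mem_keys _ _).mpr hq)
      · rfl
    rw [ih _ p hnd' (fun q' hq' => by rw [hkeys]; exact hK q' (List.mem_cons_of_mem _ hq'))]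
    have hgd : (if PySem.Int.mod x q = 0 then d.modify q 0 (fun v => v + x) else d).getD p 0
        = d.getD p 0 + (if p = q ∧ PySem.Int.mod x q = 0 then x else 0) := by
      split
      · next hm =>
        rw [PySem.Dict.getD_modify]
        by_cases hpq : p = q <;> simp [hpq, hm]
      · next hm => simp [hm]
    rw [hgd]
    by_cases h1 : p = q
    · subst h1
      by_cases h2 : PySem.Int.mod x p = 0 <;> simp [h2, hqt]
    · by_cases h2 : p ∈ t ∧ PySem.Int.mod x p = 0 <;> simp [h1, h2]

theorem phase2_keys (lst : List Int) : ∀ d : PySem.Dict Int Int,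
    (lst.foldl (fun d number => d.keys.foldl (fun d2 prime =>
        if PySem.Int.mod number prime = 0 then d2.modify prime 0 (fun v => v + number) else d2) d) d).keys
      = d.keys := by
  induction lst with
  | nil => intro d; rfl
  | cons x rest ih =>
    intro d
    rw [List.foldl_cons, ih, inner2_keys x d.keys d (fun q hq => hq)]

theorem phase2_getD (lst : List Int) : ∀ d : PySem.Dict Int Int, d.keys.Nodup → ∀ p,
    (lst.foldl (fun d number => d.keys.foldl (fun d2 prime =>
        if PySem.Int.mod number prime = 0 then d2.modify prime 0 (fun v => v + number) else d2) d) d).getD p 0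
      = d.getD p 0 + (lst.map (fun x => if p ∈ d.keys ∧ PySem.Int.mod x p = 0 then x else 0)).sum := by
  induction lst with
  | nil => intro d _ p; simp
  | cons x rest ih =>
    intro d hnd p
    rw [List.foldl_cons]
    have hk1 := inner2_keys x d.keys d (fun q hq => hq)
    rw [ih _ (by rw [hk1]; exact hnd) p, hk1,
        inner2_getD x d.keys d p hnd (fun q hq => hq)]
    rw [List.map_cons, List.sum_cons, add_assoc]

-- ---- the two whole-list folds ----
theorem bstep_eq (s : PySem.Dict Int Int) (x : Int) :
    (let r := bLoop x.natAbs 2 x s;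
     if 1 < r.1 then r.2.insert ((r.1 : Nat) : Int) (r.2.getD ((r.1 : Nat) : Int) 0 + x) else r.2)
      = addP x s (pk x) :=
  bLoop_eq x.natAbs 2 x s

theorem pf_keys (x : Int) : (prime_factors x).keys = pkInt x := by
  rw [prime_factors_eq, addK_keys,
      show (PySem.Dict.empty : PySem.Dict Int Int).keys = ([] : List Int) from rfl,
      PySem.Set.update_nil_left]
  exact PySem.Set.ofList_eq_self_of_nodup _ (pkInt_nodup x)

theorem phase1_step (d : PySem.Dict Int Int) (x : Int) :
    (prime_factors x).keys.foldl (fun d key => d.insert key 0) d = addK d (pk x) := by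
  rw [pf_keys, pkInt, List.foldl_map]
  rfl

theorem chainA_keys_nodup (lst : List Int) : ∀ d : PySem.Dict Int Int, d.keys.Nodup →
    (lst.foldl (fun d x => addK d (pk x)) d).keys.Nodup := by
  induction lst with
  | nil => intro d h; exact h
  | cons x rest ih => intro d h; exact ih _ (addK_nodup d (pk x) h)

theorem chainAB_keys (lst : List Int) : ∀ (d s : PySem.Dict Int Int), d.keys = s.keys →
    (lst.foldl (fun d x => addK d (pk x)) d).keys
      = (lst.foldl (fun s x => addP x s (pk x)) s).keys := by
  induction lst with
  | nil => intro d s h; exact h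
  | cons x rest ih =>
    intro d s h
    rw [List.foldl_cons, List.foldl_cons]
    exact ih _ _ (by rw [addK_keys, addP_keys, h])

theorem chainA_mem_keys (lst : List Int) : ∀ (d : PySem.Dict Int Int) (p : Int),
    (p ∈ (lst.foldl (fun d x => addK d (pk x)) d).keys ↔ p ∈ d.keys ∨ ∃ x ∈ lst, p ∈ pkInt x) := by
  induction lst with
  | nil => simp
  | cons x rest ih =>
    intro d p
    rw [List.foldl_cons, ih, addK_keys]
    rw [show (pk x).map (fun (p : Nat) => (p : Int)) = pkInt x from rfl]
    simp only [PySem.Set.mem_update, List.mem_cons]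
    constructor
    · rintro ((h | h) | ⟨x0, hx0, hp0⟩)
      · exact Or.inl h
      · exact Or.inr ⟨x, Or.inl rfl, h⟩
      · exact Or.inr ⟨x0, Or.inr hx0, hp0⟩
    · rintro (h | ⟨x0, (rfl | hx0), hp0⟩)
      · exact Or.inl (Or.inl h)
      · exact Or.inl (Or.inr hp0)
      · exact Or.inr ⟨x0, hx0, hp0⟩

theorem chainA_getD0 (lst : List Int) : ∀ d : PySem.Dict Int Int,
    (∀ q, d.getD q 0 = 0) → ∀ q, (lst.foldl (fun d x => addK d (pk x)) d).getD q 0 = 0 := by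
  induction lst with
  | nil => intro d h q; exact h q
  | cons x rest ih => intro d h q; exact ih _ (addK_getD0 (pk x) d h) q

theorem chainB_getD (lst : List Int) : ∀ (s : PySem.Dict Int Int) (p : Int),
    (lst.foldl (fun s x => addP x s (pk x)) s).getD p 0
      = s.getD p 0 + (lst.map (fun x => if p ∈ pkInt x then x else 0)).sum := by
  induction lst with
  | nil => intro s p; simp
  | cons x rest ih =>
    intro s p
    rw [List.foldl_cons, ih, addP_getD x (pk x) s p (pkInt_nodup x),
        List.map_cons, List.sum_cons, add_assoc]
    rfl

-- the per-element agreement of the two counted conditions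
theorem cond_agree (lst : List Int) (p : Int)
    (hm : p ∈ (lst.foldl (fun d x => addK d (pk x)) PySem.Dict.empty).keys → ∃ x0 ∈ lst, p ∈ pkInt x0) :
    ∀ x ∈ lst,
      (if p ∈ (lst.foldl (fun d x => addK d (pk x)) PySem.Dict.empty).keys ∧ PySem.Int.mod x p = 0
        then x else 0)
      = (if p ∈ pkInt x then x else 0) := by
  intro x hx
  by_cases hx0 : x = 0
  · subst hx0; simp
  · by_cases hpk : p ∈ pkInt x
    · obtain ⟨q, hq, rfl⟩ := List.mem_map.mp hpk
      obtain ⟨hqp, hqd, -⟩ := (mem_pk x q).mp hq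
      have hmem : (q : Int) ∈ (lst.foldl (fun d x => addK d (pk x)) PySem.Dict.empty).keys := by
        rw [chainA_mem_keys]
        exact Or.inr ⟨x, hx, hpk⟩
      have hmod : PySem.Int.mod x (q : Int) = 0 := by
        rw [PySem.Int.mod_eq_zero_iff_dvd]
        rw [← Int.natAbs_dvd_natAbs, Int.natAbs_natCast]
        exact hqd
      simp [hmem, hmod, hpk]
    · simp only [if_neg hpk]
      by_cases hc : p ∈ (lst.foldl (fun d x => addK d (pk x)) PySem.Dict.empty).keys
          ∧ PySem.Int.mod x p = 0
      · exfalso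
        obtain ⟨x0, hx0m, hp0⟩ := hm hc.1
        obtain ⟨q, hq, rfl⟩ := List.mem_map.mp hp0
        obtain ⟨hqp, -, -⟩ := (mem_pk x0 q).mp hq
        have : (q : Int) ∣ x := (PySem.Int.mod_eq_zero_iff_dvd _ _).mp hc.2
        have hqd : q ∣ x.natAbs := by
          rw [← Int.natAbs_natCast q]
          exact Int.natAbs_dvd_natAbs.mpr this
        exact hpk (List.mem_map.mpr ⟨q, (mem_pk x q).mpr ⟨hqp, hqd, hx0⟩, rfl⟩)
      · rw [if_neg hc]

-- ===== VERDICT (by name: the statement is the Claim_ definition above) =====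
theorem sum_for_list_spec : Claim_equal_sum_for_list := by
  unfold Claim_equal_sum_for_list
  intro lst _
  unfold Spec_sum_for_list
  simp only [sum_for_list, sum_for_list_alt]
  rw [PySem.List.foldl_congr_mem (l := lst) (init := PySem.Dict.empty)
        (f := fun (d : PySem.Dict Int Int) (numbers : Int) =>
          (prime_factors numbers).keys.foldl (fun d key => d.insert key 0) d)
        (g := fun (d : PySem.Dict Int Int) (x : Int) => addK d (pk x))
        (fun acc x _ => phase1_step acc x)]
  rw [PySem.List.foldl_congr_mem (l := lst) (init := PySem.Dict.empty)
        (f := fun (sums : PySem.Dict Int Int) (x : Int) =>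
          if 1 < (bLoop x.natAbs 2 x sums).1 then
            (bLoop x.natAbs 2 x sums).2.insert (((bLoop x.natAbs 2 x sums).1 : Nat) : Int)
              ((bLoop x.natAbs 2 x sums).2.getD (((bLoop x.natAbs 2 x sums).1 : Nat) : Int) 0 + x)
          else (bLoop x.natAbs 2 x sums).2)
        (g := fun (s : PySem.Dict Int Int) (x : Int) => addP x s (pk x))
        (fun acc x _ => bstep_eq acc x)]
  set KA := lst.foldl (fun d x => addK d (pk x)) PySem.Dict.empty with hKA
  set KB := lst.foldl (fun s x => addP x s (pk x)) PySem.Dict.empty with hKB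
  set DA2 := lst.foldl (fun d number => d.keys.foldl (fun d2 prime =>
      if PySem.Int.mod number prime = 0 then d2.modify prime 0 (fun v => v + number) else d2) d) KA
    with hDA2
  have hKAnodup : KA.keys.Nodup := chainA_keys_nodup lst PySem.Dict.empty PySem.Dict.nodup_keys_empty
  have hkeys2 : DA2.keys = KA.keys := phase2_keys lst KA
  have hkeysAB : KA.keys = KB.keys := chainAB_keys lst PySem.Dict.empty PySem.Dict.empty rfl
  have hgetD : ∀ p, DA2.getD p 0 = KB.getD p 0 := by
    intro p
    rw [hDA2, phase2_getD lst KA hKAnodup p,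
        chainA_getD0 lst PySem.Dict.empty (fun q => PySem.Dict.getD_empty q 0) p,
        hKB, chainB_getD lst PySem.Dict.empty p, PySem.Dict.getD_empty, zero_add, zero_add]
    refine congrArg List.sum (List.map_congr_left ?_)
    exact cond_agree lst p (fun hc => by
      rcases (chainA_mem_keys lst PySem.Dict.empty p).mp hc with h | h
      · simp at h
      · exact h)
  have hitems : DA2.items = KB.items := by
    apply dict_items_ext DA2 KB (by rw [hkeys2, hkeysAB]) (by rw [hkeys2]; exact hKAnodup)
    exact dict_get?_eq_of_getD DA2 KB (by rw [hkeys2, hkeysAB]) hgetD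
  rw [hitems]
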